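-- pv_equiv track=rewrite | github.com/zadorian/SEARCH_ENGINEER | modules/brute/targeted_searches/specialized/event.py | extract_event_query
-- ===== SOURCE A (Python) =====
-- def extract_event_query(query: str) -> str:
--     """Extract the actual search query from an event search query."""
--     # Remove operators
--     query = query.strip()
--
--     # Remove common operator prefixes (case-insensitive)
--     prefixes = [
--         'event:', 'concert:', 'conference:', 'festival:', 'show:',
--         'events:', 'gig:', 'performance:', 'exhibition:', 'meetup:',
--         'Event:', 'Concert:', 'Conference:', 'Festival:', 'Show:',
--         'Events:', 'Gig:', 'Performance:', 'Exhibition:', 'Meetup:'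
--     ]
--
--     for prefix in prefixes:
--         if query.startswith(prefix):
--             query = query[len(prefix):].strip()
--             # Remove quotes if present
--             if query.startswith('"') and query.endswith('"'):
--                 query = query[1:-1]
--             elif query.startswith("'") and query.endswith("'"):
--                 query = query[1:-1]
--             return query
--
--     # If no prefix found, return the query as-is
--     return query.strip()
-- ===== SOURCE B (Python) =====
-- # B: instead of scanning 20 cased prefix literals, partition at the first colon and
-- # test the head token: its lowercase form must be one of the 10 operator names and
-- # its casing must be all-lower or Capitalized; quote trimming becomes one condition.
-- _BASES = ('event', 'concert', 'conference', 'festival', 'show',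
--           'events', 'gig', 'performance', 'exhibition', 'meetup')
--
--
-- def extract_event_query(query: str) -> str:
--     query = query.strip()
--     head, sep, tail = query.partition(':')
--     low = head.lower()
--     if sep and low in _BASES and head in (low, low.capitalize()):
--         rest = tail.strip()
--         if rest and rest[0] == rest[-1] and rest[0] in '"\'':
--             rest = rest[1:-1]
--         return rest
--     return query
-- ===== Notes on version B (the rewrite author's own statement) =====
-- stated objective: alternative
-- what changed: Replaces A's linear startswith-scan over 20 cased prefix literals by one partition at the first colon plus a case-shape check (lowercase head in a 10-name tuple and casing all-lower or Capitalized), and folds A's two quote-trim branches into a single first-equals-last condition.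
import Mathlib
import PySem

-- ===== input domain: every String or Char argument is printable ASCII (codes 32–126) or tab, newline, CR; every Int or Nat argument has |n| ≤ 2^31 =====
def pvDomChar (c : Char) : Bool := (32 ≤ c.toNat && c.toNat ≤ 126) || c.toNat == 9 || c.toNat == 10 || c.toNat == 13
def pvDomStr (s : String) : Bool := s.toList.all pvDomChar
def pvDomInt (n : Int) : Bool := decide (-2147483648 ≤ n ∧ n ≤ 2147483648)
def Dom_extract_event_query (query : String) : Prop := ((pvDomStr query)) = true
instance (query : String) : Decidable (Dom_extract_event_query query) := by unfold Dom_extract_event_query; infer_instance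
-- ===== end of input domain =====

-- B replaces A's linear startswith-scan over 20 cased prefix literals by one partition at
-- the first colon plus a case-shape test (lowercase head among 10 names, casing all-lower
-- or Capitalized), and folds the two quote-trim branches into one condition (alternative).

-- ===== PORT A =====
def pvPrefixesA : List (List Char) :=
  ["event:".toList, "concert:".toList, "conference:".toList, "festival:".toList, "show:".toList,
   "events:".toList, "gig:".toList, "performance:".toList, "exhibition:".toList, "meetup:".toList,
   "Event:".toList, "Concert:".toList, "Conference:".toList, "Festival:".toList, "Show:".toList,
   "Events:".toList, "Gig:".toList, "Performance:".toList, "Exhibition:".toList, "Meetup:".toList]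

-- A's match branch: query = query[len(prefix):].strip(), then the two quote-trim tests
def pvAfterPrefix (rest : List Char) : List Char :=
  let q' := PySem.Chars.strip rest
  if PySem.Chars.startswith q' ['"'] && PySem.Chars.endswith q' ['"'] then
    PySem.List.slice q' (some 1) (some (-1))
  else if PySem.Chars.startswith q' ['\''] && PySem.Chars.endswith q' ['\''] then
    PySem.List.slice q' (some 1) (some (-1))
  else q'

-- A's 'for prefix in prefixes' loop (early return on the first matching prefix)
def pvEvqLoop (q : List Char) : List (List Char) → List Char
  | [] => PySem.Chars.strip q
  | p :: ps =>
    if PySem.Chars.startswith q p then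
      pvAfterPrefix (PySem.List.slice q (some (p.length : Int)) none)
    else pvEvqLoop q ps

def extract_event_query (query : String) : String :=
  String.ofList (pvEvqLoop (PySem.Chars.strip query.toList) pvPrefixesA)

-- ===== PORT B =====
def pvBases : List (List Char) :=
  ["event".toList, "concert".toList, "conference".toList, "festival".toList, "show".toList,
   "events".toList, "gig".toList, "performance".toList, "exhibition".toList, "meetup".toList]

-- str.capitalize ported by hand (exact on ASCII): first char upper-cased, the rest lower-cased
def pvCapitalize : List Char → List Char
  | [] => []
  | c :: t => PySem.Chars.upperChar c :: t.map PySem.Chars.lowerChar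

def extract_event_query_alt (query : String) : String :=
  let q := PySem.Chars.strip query.toList
  -- str.partition ported by hand (exact): head = text before the first colon; the
  -- separator was found iff head is shorter than q; tail = what follows it
  let head := q.takeWhile (fun c => c != ':')
  let low := PySem.Chars.lower head
  if head.length < q.length && pvBases.contains low
      && (head == low || head == pvCapitalize low) then
    let rest := PySem.Chars.strip (q.drop (head.length + 1))
    -- 'rest and rest[0] == rest[-1] and rest[0] in "\"'"': truthiness of rest is length ≠ 0;
    -- the two element reads are compared under that guard (Option equality, exact)
    if rest.length != 0 && (PySem.List.pyGet? rest 0 == PySem.List.pyGet? rest (-1))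
        && (PySem.List.pyGet? rest 0 == some '"' || PySem.List.pyGet? rest 0 == some '\'') then
      String.ofList (PySem.List.slice rest (some 1) (some (-1)))
    else String.ofList rest
  else String.ofList q

-- ===== PRECONDITION & SPEC =====
def Spec_extract_event_query (query : String) (out : String) : Prop := out = extract_event_query_alt query
instance (query : String) (out : String) : Decidable (Spec_extract_event_query query out) := by unfold Spec_extract_event_query; infer_instance

-- ===== CLAIM (what is proved, stated in full; the proofs are below) =====
def Claim_equal_extract_event_query : Prop := ∀ (query : String), Dom_extract_event_query query → Spec_extract_event_query query (extract_event_query query)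

-- ===== LEMMAS AND PROOFS =====

-- dropWhile is idempotent
theorem pv_dropWhile_idem (p : Char → Bool) (l : List Char) :
    List.dropWhile p (List.dropWhile p l) = List.dropWhile p l := by
  induction l with
  | nil => simp
  | cons a t ih =>
    by_cases h : p a = true
    · simp [h, ih]
    · simp [h]

-- a prefix of an already-left-stripped list is left-stripped
theorem pv_dropWhile_prefix (p : Char → Bool) (u v : List Char)
    (hv : v <+: u) (hu : List.dropWhile p u = u) : List.dropWhile p v = v := by
  cases v with
  | nil => simp
  | cons a t =>
    obtain ⟨w, hw⟩ := hv
    subst hw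
    rw [List.cons_append] at hu
    rw [List.dropWhile_cons] at hu ⊢
    by_cases h : p a = true
    · exfalso
      rw [if_pos h] at hu
      have hlen := (List.dropWhile_sublist (l := t ++ w) (p := p)).length_le
      rw [hu] at hlen
      simp at hlen
    · simp [h]

-- strip is idempotent
theorem pv_strip_idem (s : List Char) :
    PySem.Chars.strip (PySem.Chars.strip s) = PySem.Chars.strip s := by
  unfold PySem.Chars.strip PySem.Chars.lstrip PySem.Chars.rstrip
  set p := PySem.Chars.isspace with hp
  set u := List.dropWhile p s with hu
  have hu2 : List.dropWhile p u = u := pv_dropWhile_idem p s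
  set v := (List.dropWhile p u.reverse).reverse with hv
  have hvu : v <+: u := by
    rw [hv]
    have : (List.dropWhile p u.reverse).reverse <+: u.reverse.reverse :=
      List.reverse_prefix.mpr (List.dropWhile_suffix p)
    simpa using this
  have hv2 : List.dropWhile p v = v := pv_dropWhile_prefix p u v hvu hu2
  rw [hv2]
  have hrev : List.dropWhile p v.reverse = v.reverse := by
    rw [hv, List.reverse_reverse]
    exact pv_dropWhile_idem p u.reverse
  rw [hrev, hv, List.reverse_reverse]

-- startswith a colon-terminated prefix ↔ the text before the first colon is that name
theorem pv_prefix_iff (name : List Char) (h : ∀ c ∈ name, c ≠ ':') (s : List Char) :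
    ((name ++ [':']) <+: s) ↔
      (s.takeWhile (fun c => c != ':') = name ∧ name.length < s.length) := by
  induction name generalizing s with
  | nil =>
    cases s with
    | nil => simp
    | cons b t =>
      by_cases hb : b = ':'
      · subst hb; simp [List.cons_prefix_cons]
      · simp [List.cons_prefix_cons, hb, Ne.symm hb]
  | cons a name ih =>
    have ha : a ≠ ':' := h a (by simp)
    have h' : ∀ c ∈ name, c ≠ ':' := fun c hc => h c (by simp [hc])
    cases s with
    | nil => simp
    | cons b t =>
      rw [List.cons_append, List.cons_prefix_cons, List.takeWhile_cons]
      by_cases hb : b = ':'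
      · subst hb
        simp [ha]
      · have hbne : (b != ':') = true := by simp [hb]
        rw [if_pos hbne]
        constructor
        · rintro ⟨rfl, hpre⟩
          obtain ⟨htw, hlen⟩ := (ih h' t).mp hpre
          exact ⟨by rw [htw], by simpa using hlen⟩
        · rintro ⟨heq, hlen⟩
          have hba : b = a := by
            have := congrArg (fun l => l.head?) heq
            simpa using this
          subst hba
          have htw : t.takeWhile (fun c => c != ':') = name := by
            have := congrArg List.tail heq
            simpa using this
          exact ⟨rfl, (ih h' t).mpr ⟨htw, by simpa using hlen⟩⟩

-- A's 20 cased prefixes, stripped of their colon, are exactly B's case-shape test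
theorem pv_member_iff (head : List Char) :
    (head ∈ pvPrefixesA.map (fun p => p.dropLast)) ↔
      (pvBases.contains (PySem.Chars.lower head)
        && (head == PySem.Chars.lower head
            || head == pvCapitalize (PySem.Chars.lower head))) = true := by
  constructor
  · intro h
    simp only [pvPrefixesA, List.map_cons, List.map_nil, List.mem_cons,
      List.not_mem_nil, or_false] at h
    rcases h with h|h|h|h|h|h|h|h|h|h|h|h|h|h|h|h|h|h|h|h <;> subst h <;> decide
  · intro h
    obtain ⟨h1, h2⟩ := Bool.and_eq_true_iff.mp h
    have hmem : PySem.Chars.lower head ∈ pvBases := by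
      simpa using h1
    simp only [pvBases, List.mem_cons, List.not_mem_nil, or_false] at hmem
    have h2' : head = PySem.Chars.lower head ∨
        head = pvCapitalize (PySem.Chars.lower head) := by
      rcases Bool.or_eq_true_iff.mp h2 with h|h
      · exact Or.inl (by simpa using h)
      · exact Or.inr (by simpa using h)
    rcases hmem with h|h|h|h|h|h|h|h|h|h <;>
      rcases h2' with h2'|h2' <;> rw [h] at h2' <;> subst h2' <;> decide

-- boolean core of the quote-trim equivalence
theorem pv_if_bool (a b : Char) (S E : List Char) :
    (if a == '"' && b == '"' then S else if a == '\'' && b == '\'' then S else E)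
    = (if a == b && (a == '"' || a == '\'') then S else E) := by
  by_cases h1 : a = '"' <;> by_cases h2 : b = '"' <;> by_cases h3 : a = '\'' <;>
    by_cases h4 : b = '\'' <;> simp_all <;> (rintro rfl; simp_all)

-- the two quote-trim branches equal B's single first-equals-last test
theorem pv_trim_eq (r : List Char) :
    (if PySem.Chars.startswith r ['"'] && PySem.Chars.endswith r ['"'] then
        PySem.List.slice r (some 1) (some (-1))
      else if PySem.Chars.startswith r ['\''] && PySem.Chars.endswith r ['\''] then
        PySem.List.slice r (some 1) (some (-1))
      else r)
    = (if r.length != 0 && (PySem.List.pyGet? r 0 == PySem.List.pyGet? r (-1))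
          && (PySem.List.pyGet? r 0 == some '"' || PySem.List.pyGet? r 0 == some '\'') then
        PySem.List.slice r (some 1) (some (-1))
      else r) := by
  cases r with
  | nil => decide
  | cons a t =>
    have hne : a :: t ≠ [] := by simp
    have h0 : PySem.List.pyGet? (a :: t) (0 : Int) = some a := by
      simp [PySem.List.pyGet?, PySem.List.pyIdx?]
    have h1 : PySem.List.pyGet? (a :: t) (-1 : Int) = some ((a :: t).getLast hne) := by
      have hd := PySem.List.pyGetD_neg_one (xs := a :: t) (d := a) hne
      simp only [PySem.List.pyGetD] at hd
      cases hg : PySem.List.pyGet? (a :: t) (-1 : Int) with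
      | none =>
        simp [PySem.List.pyGet?, PySem.List.pyIdx?] at hg
      | some x => rw [hg] at hd; simp at hd; rw [hd]
    have hsw : ∀ c : Char, PySem.Chars.startswith (a :: t) [c] = (a == c) := by
      intro c
      by_cases hac : a = c
      · subst hac
        have h := (PySem.Chars.startswith_iff (s := a :: t) (p := [a])).mpr ⟨t, rfl⟩
        simp [h]
      · have h : PySem.Chars.startswith (a :: t) [c] = false := by
          rw [← Bool.not_eq_true, PySem.Chars.startswith_iff]
          rintro ⟨w, hw⟩
          have hca : c = a := by simpa using congrArg (fun l => l.head?) hw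
          exact hac hca.symm
        simp [h, hac]
    have hew : ∀ c : Char, PySem.Chars.endswith (a :: t) [c]
        = ((a :: t).getLast hne == c) := by
      intro c
      by_cases hlc : (a :: t).getLast hne = c
      · have hsuf : [c] <:+ a :: t := by
          refine ⟨(a :: t).dropLast, ?_⟩
          rw [← hlc]
          exact (a :: t).dropLast_append_getLast hne
        have h := (PySem.Chars.endswith_iff (s := a :: t) (p := [c])).mpr hsuf
        simp [h, hlc]
      · have h : PySem.Chars.endswith (a :: t) [c] = false := by
          rw [← Bool.not_eq_true, PySem.Chars.endswith_iff]
          rintro ⟨w, hw⟩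
          apply hlc
          have h2 := congrArg (fun l => l.getLast?) hw
          simp [List.getLast?_append] at h2
          rw [List.getLast_eq_iff_getLast?_eq_some]
          exact h2.symm
        simp [h, hlc]
    rw [h0, h1, hsw, hsw, hew, hew]
    have hlen : ((a :: t).length != 0) = true := by simp
    rw [hlen]
    simp only [Bool.true_and, Option.some_beq_some]
    exact pv_if_bool a ((a :: t).getLast hne) _ _

-- the prefix loop over the 20 prefixes, rephrased through the first colon
theorem pv_loop_eq (q : List Char) :
    pvEvqLoop q pvPrefixesA =
      (if (q.takeWhile (fun c => c != ':')).length < q.length ∧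
          q.takeWhile (fun c => c != ':') ∈ pvPrefixesA.map (fun p => p.dropLast) then
        pvAfterPrefix (q.drop ((q.takeWhile (fun c => c != ':')).length + 1))
      else PySem.Chars.strip q) := by
  have step : ∀ (ns : List (List Char)), (∀ n ∈ ns, ∀ c ∈ n, c ≠ ':') →
      pvEvqLoop q (ns.map (· ++ [':'])) =
        (if (q.takeWhile (fun c => c != ':')).length < q.length ∧
            q.takeWhile (fun c => c != ':') ∈ ns then
          pvAfterPrefix (q.drop ((q.takeWhile (fun c => c != ':')).length + 1))
        else PySem.Chars.strip q) := by
    intro ns hns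
    induction ns with
    | nil => simp [pvEvqLoop]
    | cons n ns ih =>
      have hn : ∀ c ∈ n, c ≠ ':' := hns n (by simp)
      have hns' : ∀ m ∈ ns, ∀ c ∈ m, c ≠ ':' := fun m hm => hns m (by simp [hm])
      rw [List.map_cons]
      show (if PySem.Chars.startswith q (n ++ [':']) then
          pvAfterPrefix (PySem.List.slice q (some ((n ++ [':']).length : Int)) none)
        else pvEvqLoop q (ns.map (· ++ [':']))) = _
      by_cases hm : (n ++ [':']) <+: q
      · have hsw : PySem.Chars.startswith q (n ++ [':']) = true := by
          rw [PySem.Chars.startswith_iff]; exact hm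
        obtain ⟨htw, hlen⟩ := (pv_prefix_iff n hn q).mp hm
        have hcond : (q.takeWhile (fun c => c != ':')).length < q.length ∧
            q.takeWhile (fun c => c != ':') ∈ n :: ns :=
          ⟨by rw [htw]; exact hlen, by simp [htw]⟩
        rw [if_pos hsw, if_pos hcond]
        have hslice : PySem.List.slice q (some ((n ++ [':']).length : Int)) none
            = q.drop ((q.takeWhile (fun c => c != ':')).length + 1) := by
          rw [PySem.List.slice_from_natCast]
          congr 1
          simp [htw]
        rw [hslice]
      · have hsw : PySem.Chars.startswith q (n ++ [':']) = false := by
          rw [← Bool.not_eq_true]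
          intro hc
          rw [PySem.Chars.startswith_iff] at hc
          exact hm hc
        have hne : ¬ (q.takeWhile (fun c => c != ':') = n ∧ n.length < q.length) :=
          fun hc => hm ((pv_prefix_iff n hn q).mpr hc)
        rw [if_neg (by simp [hsw]), ih hns']
        by_cases hc : (q.takeWhile (fun c => c != ':')).length < q.length ∧
            q.takeWhile (fun c => c != ':') ∈ ns
        · rw [if_pos hc, if_pos ⟨hc.1, List.mem_cons_of_mem n hc.2⟩]
        · have hnc : ¬ ((q.takeWhile (fun c => c != ':')).length < q.length ∧
              q.takeWhile (fun c => c != ':') ∈ n :: ns) := by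
            rintro ⟨ha, hb⟩
            rcases List.mem_cons.mp hb with heq | hmem
            · exact hne ⟨heq, by rw [← heq]; exact ha⟩
            · exact hc ⟨ha, hmem⟩
          rw [if_neg hc, if_neg hnc]
  have hA : pvPrefixesA = (pvPrefixesA.map (fun p => p.dropLast)).map (· ++ [':']) := by rfl
  have hnb : (pvPrefixesA.map (fun p => p.dropLast)).all
      (fun n => n.all (fun c => c != ':')) = true := by rfl
  have hnames : ∀ n ∈ pvPrefixesA.map (fun p => p.dropLast), ∀ c ∈ n, c ≠ ':' := by
    intro n hn c hc
    simpa using List.all_eq_true.mp (List.all_eq_true.mp hnb n hn) c hc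
  conv_lhs => rw [hA]
  rw [step _ hnames]

-- ===== VERDICT (by name: the statement is the Claim_ definition above) =====
set_option maxHeartbeats 1000000 in
theorem extract_event_query_spec : Claim_equal_extract_event_query := by
  intro query _
  simp only [Spec_extract_event_query, extract_event_query, extract_event_query_alt]
  rw [pv_loop_eq]
  set q := PySem.Chars.strip query.toList with hq
  set head := q.takeWhile (fun c => c != ':') with hhead
  by_cases hc : head.length < q.length ∧ head ∈ pvPrefixesA.map (fun p => p.dropLast)
  · rw [if_pos hc]
    have hb : (decide (head.length < q.length) && (pvBases.contains (PySem.Chars.lower head)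
        && (head == PySem.Chars.lower head
            || head == pvCapitalize (PySem.Chars.lower head)))) = true :=
      Bool.and_eq_true_iff.mpr ⟨decide_eq_true hc.1, (pv_member_iff head).mp hc.2⟩
    rw [← Bool.and_assoc] at hb
    rw [if_pos hb]
    simp only [pvAfterPrefix]
    rw [pv_trim_eq, apply_ite String.ofList]
  · rw [if_neg hc, if_neg, hq, pv_strip_idem]
    intro hx
    rw [Bool.and_assoc, Bool.and_eq_true_iff] at hx
    exact hc ⟨of_decide_eq_true hx.1, (pv_member_iff head).mpr hx.2⟩
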